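-- pv_equiv track=rewrite | github.com/science-of-finetuning/diffing-toolkit | dashboard.py | _parse_organism_key
-- ===== SOURCE A (Python) =====
-- from typing import Dict, List, Any, Tuple
--
-- def _parse_organism_key(
--     organism_key: str, available_organisms: List[str]
-- ) -> Tuple[str, str]:
--     """Parse an organism_key like 'cake_bake_mix1-0p5' into ('cake_bake', 'mix1-0p5').
--
--     Matches against known organism names to handle underscores in organism names.
--     Returns (organism_name, variant) where variant is 'default' if no variant suffix.
--     """
--     # Sort by length descending to match longest organism name first
--     for organism in sorted(available_organisms, key=len, reverse=True):
--         if organism_key == organism: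
--             return (organism, "default")
--         if organism_key.startswith(organism + "_"):
--             variant = organism_key[len(organism) + 1 :]
--             return (organism, variant)
--     # Fallback: treat the whole key as organism name
--     return (organism_key, "default")
-- ===== SOURCE B (Python) =====
-- def _parse_organism_key(organism_key, available_organisms):
--     known = set(available_organisms)
--     if organism_key in known:
--         return (organism_key, "default")
--     # try underscore-boundary prefixes, longest first
--     for i in range(len(organism_key) - 1, -1, -1):
--         if organism_key[i] == "_" and organism_key[:i] in known:
--             return (organism_key[:i], organism_key[i + 1:])
--     return (organism_key, "default")
-- ===== Notes on version B (the rewrite author's own statement) =====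
-- stated objective: alternative
-- what changed: Instead of sorting all organisms by length and scanning them, B builds a set once and probes only the underscore-boundary prefixes of organism_key, longest first.
import Mathlib
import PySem

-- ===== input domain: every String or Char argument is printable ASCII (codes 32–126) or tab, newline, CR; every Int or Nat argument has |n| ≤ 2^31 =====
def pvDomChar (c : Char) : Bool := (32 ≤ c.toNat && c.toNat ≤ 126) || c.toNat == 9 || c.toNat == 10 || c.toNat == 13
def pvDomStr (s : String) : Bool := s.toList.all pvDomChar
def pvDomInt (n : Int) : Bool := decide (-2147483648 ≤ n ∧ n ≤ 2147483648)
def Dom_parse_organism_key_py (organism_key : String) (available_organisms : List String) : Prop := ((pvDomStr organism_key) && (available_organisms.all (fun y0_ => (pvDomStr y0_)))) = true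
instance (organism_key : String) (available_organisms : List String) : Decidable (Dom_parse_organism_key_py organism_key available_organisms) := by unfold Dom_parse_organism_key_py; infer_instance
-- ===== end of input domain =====

-- B replaces A's sort-all-organisms-and-scan by a set built once, probed only at the
-- underscore-boundary prefixes of organism_key, longest first (objective: alternative).


-- ===== PORT A =====
-- the for-loop over sorted(available_organisms, key=len, reverse=True)
def pvALoop (organism_key : String) : List String → String × String
  | [] => (organism_key, "default")
  | organism :: rest =>
    if organism_key == organism then (organism, "default")
    else if PySem.Str.startswith organism_key (organism ++ "_") then
      (organism, PySem.Str.slice organism_key (some (PySem.Str.len organism + 1)) none)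
    else pvALoop organism_key rest

def parse_organism_key_py (organism_key : String) (available_organisms : List String) : String × String :=
  pvALoop organism_key (PySem.List.sorted available_organisms (fun o => PySem.Str.len o) true)

-- ===== PORT B =====
-- the for-loop over range(len(organism_key) - 1, -1, -1)
def pvBLoop (organism_key : String) (known : PySem.Set String) : List Int → String × String
  | [] => (organism_key, "default")
  | i :: rest =>
    if PySem.Str.pyGet? organism_key i == some '_'
        && PySem.Set.contains known (PySem.Str.slice organism_key none (some i)) then
      (PySem.Str.slice organism_key none (some i),
       PySem.Str.slice organism_key (some (i + 1)) none)
    else pvBLoop organism_key known rest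

def parse_organism_key_py_alt (organism_key : String) (available_organisms : List String) : String × String :=
  let known := PySem.Set.ofList available_organisms
  if PySem.Set.contains known organism_key then (organism_key, "default")
  else pvBLoop organism_key known (PySem.List.pyRange (PySem.Str.len organism_key - 1) (-1) (-1))

-- ===== PRECONDITION & SPEC =====
def Spec_parse_organism_key_py (organism_key : String) (available_organisms : List String) (out : String × String) : Prop := out = parse_organism_key_py_alt organism_key available_organisms
instance (organism_key : String) (available_organisms : List String) (out : String × String) : Decidable (Spec_parse_organism_key_py organism_key available_organisms out) := by unfold Spec_parse_organism_key_py; infer_instance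

-- ===== CLAIM (what is proved, stated in full; the proofs are below) =====
def Claim_equal_parse_organism_key_py : Prop := ∀ (organism_key : String) (available_organisms : List String), Dom_parse_organism_key_py organism_key available_organisms → Spec_parse_organism_key_py organism_key available_organisms (parse_organism_key_py organism_key available_organisms)

-- ===== LEMMAS AND PROOFS =====

-- "organism m matches key k": the disjunction of A's two branch tests
def pvMatch (k m : String) : Prop := k = m ∨ PySem.Str.startswith k (m ++ "_") = true

theorem pvMatch_prefix {k m : String} (h : pvMatch k m) : m.toList <+: k.toList := by
  rcases h with h | h
  · subst h; exact List.prefix_refl _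
  · rw [PySem.Str.startswith_eq, PySem.Chars.startswith_iff, String.toList_append] at h
    exact (List.prefix_append _ _).trans h

theorem pvMatch_unique {k m m' : String} (h : pvMatch k m) (h' : pvMatch k m')
    (hlen : m.toList.length = m'.toList.length) : m = m' := by
  have p := pvMatch_prefix h
  have p' := pvMatch_prefix h'
  rw [List.prefix_iff_eq_take] at p p'
  rw [← String.toList_inj, p, p', hlen]

-- A's loop returns the maximal-length match when the list is sorted by length descending
theorem pvALoop_eq_of {k m : String} {L : List String}
    (hp : L.Pairwise (fun a b => PySem.Str.len b ≤ PySem.Str.len a))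
    (hm : m ∈ L) (hP : pvMatch k m)
    (hmax : ∀ m' ∈ L, pvMatch k m' → PySem.Str.len m' ≤ PySem.Str.len m) :
    pvALoop k L =
      (if k = m then (m, "default")
       else (m, PySem.Str.slice k (some (PySem.Str.len m + 1)) none)) := by
  induction L with
  | nil => exact absurd hm (List.not_mem_nil)
  | cons a t ih =>
    rw [List.pairwise_cons] at hp
    by_cases hPa : pvMatch k a
    · have ham : a = m := by
        rcases List.mem_cons.1 hm with rfl | hmt
        · rfl
        · have h1 : PySem.Str.len m ≤ PySem.Str.len a := hp.1 m hmt
          have h2 : PySem.Str.len a ≤ PySem.Str.len m := hmax a List.mem_cons_self hPa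
          have hlen : m.toList.length = a.toList.length := by
            have := le_antisymm h1 h2
            simp only [PySem.Str.len_eq] at this
            exact_mod_cast this
          exact (pvMatch_unique hP hPa hlen).symm
      subst ham
      by_cases hk : k = a
      · simp [pvALoop, hk]
      · have hs : PySem.Str.startswith k (a ++ "_") = true := by
          rcases hPa with h | h
          · exact absurd h hk
          · exact h
        simp only [pvALoop, beq_iff_eq, if_neg hk]
        rw [if_pos hs]
    · have hka : ¬ k = a := fun h => hPa (Or.inl h)
      have hsa : ¬ PySem.Str.startswith k (a ++ "_") = true := fun h => hPa (Or.inr h)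
      have hmt : m ∈ t := by
        rcases List.mem_cons.1 hm with rfl | hmt
        · exact absurd hP hPa
        · exact hmt
      simp only [pvALoop, beq_iff_eq, if_neg hka, if_neg hsa]
      exact ih hp.2 hmt (fun m' hm' => hmax m' (List.mem_cons_of_mem a hm'))

theorem pvALoop_eq_default {k : String} {L : List String}
    (h : ∀ m ∈ L, ¬ pvMatch k m) : pvALoop k L = (k, "default") := by
  induction L with
  | nil => rfl
  | cons a t ih =>
    have ha := h a List.mem_cons_self
    have hka : ¬ k = a := fun hh => ha (Or.inl hh)
    have hsa : ¬ PySem.Str.startswith k (a ++ "_") = true := fun hh => ha (Or.inr hh)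
    simp only [pvALoop, beq_iff_eq, if_neg hka, if_neg hsa]
    exact ih (fun m hm => h m (List.mem_cons_of_mem a hm))

-- B's branch condition at index i
def pvCond (k : String) (known : PySem.Set String) (i : Int) : Bool :=
  PySem.Str.pyGet? k i == some '_'
    && PySem.Set.contains known (PySem.Str.slice k none (some i))

-- B's loop returns the largest matching index when the index list is strictly descending
theorem pvBLoop_eq_of {k : String} {known : PySem.Set String} {i₀ : Int} {I : List Int}
    (hp : I.Pairwise (fun a b => b < a))
    (hm : i₀ ∈ I) (hc : pvCond k known i₀ = true)
    (hmax : ∀ i ∈ I, pvCond k known i = true → i ≤ i₀) :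
    pvBLoop k known I =
      (PySem.Str.slice k none (some i₀), PySem.Str.slice k (some (i₀ + 1)) none) := by
  induction I with
  | nil => exact absurd hm (List.not_mem_nil)
  | cons a t ih =>
    rw [List.pairwise_cons] at hp
    by_cases hca : pvCond k known a = true
    · have ham : a = i₀ := by
        rcases List.mem_cons.1 hm with rfl | hmt
        · rfl
        · exact absurd (hp.1 i₀ hmt) (not_lt.2 (hmax a List.mem_cons_self hca))
      subst ham
      unfold pvCond at hca
      simp only [pvBLoop]
      rw [if_pos hca]
    · have hmt : i₀ ∈ t := by
        rcases List.mem_cons.1 hm with rfl | hmt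
        · exact absurd hc hca
        · exact hmt
      unfold pvCond at hca
      rw [Bool.not_eq_true] at hca
      simp only [pvBLoop, hca, Bool.false_eq_true, if_false]
      exact ih hp.2 hmt (fun i hi => hmax i (List.mem_cons_of_mem a hi))

theorem pvBLoop_eq_default {k : String} {known : PySem.Set String} {I : List Int}
    (h : ∀ i ∈ I, ¬ pvCond k known i = true) : pvBLoop k known I = (k, "default") := by
  induction I with
  | nil => rfl
  | cons a t ih =>
    have hca := h a List.mem_cons_self
    unfold pvCond at hca
    rw [Bool.not_eq_true] at hca
    simp only [pvBLoop, hca, Bool.false_eq_true, if_false]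
    exact ih (fun i hi => h i (List.mem_cons_of_mem a hi))

-- the prefix of k of length j, as a String slice
theorem pv_toList_slice_take (k : String) (j : Nat) :
    (PySem.Str.slice k none (some (j : Int))).toList = k.toList.take j := by
  rw [PySem.Str.toList_slice]
  exact PySem.List.slice_to _ (by positivity) |>.trans (by norm_num)

theorem pv_len_slice {k : String} {j : Nat} (hj : j ≤ k.toList.length) :
    PySem.Str.len (PySem.Str.slice k none (some (j : Int))) = (j : Int) := by
  rw [PySem.Str.len_eq, pv_toList_slice_take, List.length_take]
  omega

-- matching organisms other than k itself correspond exactly to underscore boundaries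
theorem pv_match_iff {k m : String} (hne : k ≠ m) :
    pvMatch k m ↔
      m.toList.length < k.toList.length ∧
      k.toList[m.toList.length]? = some '_' ∧
      m.toList = k.toList.take m.toList.length := by
  constructor
  · intro h
    rcases h with h | h
    · exact absurd h hne
    · rw [PySem.Str.startswith_eq, PySem.Chars.startswith_iff, String.toList_append,
        show ("_" : String).toList = ['_'] from rfl] at h
      obtain ⟨r, hr⟩ := h
      have hlen : m.toList.length + 1 + r.length = k.toList.length := by
        rw [← hr]; simp; omega
      refine ⟨by omega, ?_, ?_⟩
      · have hidx : m.toList.length < (m.toList ++ ['_']).length := by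
          rw [List.length_append]; simp
        rw [← hr, List.getElem?_append_left hidx,
          List.getElem?_append_right (le_refl _)]
        simp
      · have : m.toList <+: k.toList := ⟨'_' :: r, by simpa using hr⟩
        exact List.prefix_iff_eq_take.1 this
  · rintro ⟨hlt, hget, htake⟩
    right
    rw [PySem.Str.startswith_eq, PySem.Chars.startswith_iff, String.toList_append,
      show ("_" : String).toList = ['_'] from rfl]
    refine ⟨k.toList.drop (m.toList.length + 1), ?_⟩
    have h1 : m.toList ++ ['_'] = k.toList.take (m.toList.length + 1) := by
      rw [List.take_add_one, hget, htake]
      simp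
    rw [h1, List.take_append_drop]

theorem pv_main (k : String) (orgs : List String) :
    parse_organism_key_py k orgs = parse_organism_key_py_alt k orgs := by
  by_cases hk : k ∈ orgs
  · -- exact match: B's set lookup hits, A's loop stops at k itself
    have hc : PySem.Set.contains (PySem.Set.ofList orgs) k = true :=
      (PySem.Set.contains_iff _ _).2 ((PySem.Set.mem_ofList orgs k).2 hk)
    have hB : parse_organism_key_py_alt k orgs = (k, "default") := by
      simp only [parse_organism_key_py_alt]
      rw [if_pos hc]
    rw [hB]
    unfold parse_organism_key_py
    rw [pvALoop_eq_of (m := k) (PySem.List.sorted_pairwise_rev orgs _)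
      ((PySem.List.mem_sorted orgs _ true k).2 hk) (Or.inl rfl) ?_]
    · simp
    · intro m' _ hm'
      have := (pvMatch_prefix hm').length_le
      simp only [PySem.Str.len_eq]
      exact_mod_cast this
  · have hc : ¬ PySem.Set.contains (PySem.Set.ofList orgs) k = true := by
      rw [PySem.Set.contains_iff, PySem.Set.mem_ofList]; exact hk
    have hB : parse_organism_key_py_alt k orgs =
        pvBLoop k (PySem.Set.ofList orgs)
          (PySem.List.pyRange (PySem.Str.len k - 1) (-1) (-1)) := by
      simp only [parse_organism_key_py_alt]
      rw [if_neg hc]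
    set known := PySem.Set.ofList orgs with hknown
    set n := k.toList.length with hn
    have hlenk : PySem.Str.len k = (n : Int) := PySem.Str.len_eq k
    set I := PySem.List.pyRange (PySem.Str.len k - 1) (-1) (-1) with hI
    have hImem : ∀ x : Int, x ∈ I ↔ 0 ≤ x ∧ x ≤ (n : Int) - 1 := by
      intro x
      rw [hI, PySem.List.mem_pyRange_neg_one, hlenk]
      omega
    have hIpair : I.Pairwise (fun a b => b < a) := by
      rw [hI, PySem.List.pyRange_neg_one_eq_reverse]
      rw [List.pairwise_reverse]
      exact PySem.List.pairwise_lt_pyRange_one _ _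
    -- bridge between A-matches and B-conditions
    have hcond_of_match : ∀ m' : String, m' ∈ orgs → pvMatch k m' → k ≠ m' →
        pvCond k known ((m'.toList.length : Nat) : Int) = true ∧ m'.toList.length < n := by
      intro m' hmem hm' hne
      obtain ⟨hlt, hget, htake⟩ := (pv_match_iff hne).1 hm'
      refine ⟨?_, hlt⟩
      unfold pvCond
      rw [Bool.and_eq_true, beq_iff_eq]
      constructor
      · rw [PySem.Str.pyGet?_natCast]; exact hget
      · rw [PySem.Set.contains_iff, hknown, PySem.Set.mem_ofList]
        have : PySem.Str.slice k none (some ((m'.toList.length : Nat) : Int)) = m' := by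
          rw [← String.toList_inj, pv_toList_slice_take, ← htake]
        rw [this]; exact hmem
    have hmatch_of_cond : ∀ j : Nat, j < n → pvCond k known ((j : Nat) : Int) = true →
        pvMatch k (PySem.Str.slice k none (some (j : Int))) ∧
        (PySem.Str.slice k none (some (j : Int))) ∈ orgs := by
      intro j hj hcond
      unfold pvCond at hcond
      rw [Bool.and_eq_true, beq_iff_eq] at hcond
      obtain ⟨hget, hcont⟩ := hcond
      rw [PySem.Str.pyGet?_natCast] at hget
      have hmem : (PySem.Str.slice k none (some (j : Int))) ∈ orgs := by
        rw [PySem.Set.contains_iff, hknown, PySem.Set.mem_ofList] at hcont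
        exact hcont
      have hne : k ≠ PySem.Str.slice k none (some (j : Int)) := by
        intro h
        have := congrArg (fun s => s.toList.length) h
        simp only [pv_toList_slice_take, List.length_take] at this
        omega
      refine ⟨(pv_match_iff hne).2 ?_, hmem⟩
      have htl : (PySem.Str.slice k none (some (j : Int))).toList = k.toList.take j :=
        pv_toList_slice_take k j
      have hlen : (PySem.Str.slice k none (some (j : Int))).toList.length = j := by
        rw [htl, List.length_take]; omega
      rw [hlen, htl]
      exact ⟨hj, hget, rfl⟩
    by_cases hex : ∃ j : Nat, j < n ∧ pvCond k known ((j : Nat) : Int) = true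
    · obtain ⟨j₁, hj₁n, hj₁⟩ := hex
      have hn0 : 1 ≤ n := by omega
      set j₀ := Nat.findGreatest (fun j => pvCond k known ((j : Nat) : Int) = true) (n - 1)
        with hj₀def
      have hj₀ : pvCond k known ((j₀ : Nat) : Int) = true :=
        Nat.findGreatest_spec (P := fun j => pvCond k known ((j : Nat) : Int) = true)
          (n := n - 1) (m := j₁) (by omega) hj₁
      have hj₀le : j₀ ≤ n - 1 := Nat.findGreatest_le _
      have hj₀lt : j₀ < n := by omega
      -- B returns the slice at j₀
      have hBval : parse_organism_key_py_alt k orgs =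
          (PySem.Str.slice k none (some (j₀ : Int)),
           PySem.Str.slice k (some ((j₀ : Int) + 1)) none) := by
        have hj₀mem : ((j₀ : Nat) : Int) ∈ I := (hImem ((j₀ : Nat) : Int)).2 (by omega)
        have hj₀max : ∀ i ∈ I, pvCond k known i = true → i ≤ ((j₀ : Nat) : Int) := by
          intro i hi hci
          have hib := (hImem i).1 hi
          have hieq : i = ((i.toNat : Nat) : Int) := by omega
          rw [hieq] at hci
          have : i.toNat ≤ j₀ := Nat.le_findGreatest (by omega) hci
          omega
        rw [hB]
        exact pvBLoop_eq_of hIpair hj₀mem hj₀ hj₀max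
      -- A returns the same
      set m := PySem.Str.slice k none (some (j₀ : Int)) with hmdef
      obtain ⟨hPm, hm_mem⟩ := hmatch_of_cond j₀ hj₀lt hj₀
      have hmlen : PySem.Str.len m = (j₀ : Int) := pv_len_slice (by omega)
      have hkne : ¬ k = m := by
        intro h
        have := congrArg PySem.Str.len h
        rw [hlenk, hmlen] at this
        omega
      have hAval : parse_organism_key_py k orgs =
          (m, PySem.Str.slice k (some (PySem.Str.len m + 1)) none) := by
        unfold parse_organism_key_py
        rw [pvALoop_eq_of (m := m) (PySem.List.sorted_pairwise_rev orgs _)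
          ((PySem.List.mem_sorted orgs _ true m).2 hm_mem) hPm ?_]
        · rw [if_neg hkne]
        · intro m' hm'sorted hm'
          rw [PySem.List.mem_sorted] at hm'sorted
          have hne' : k ≠ m' := by
            rintro rfl
            exact hk hm'sorted
          obtain ⟨hcond', hlt'⟩ := hcond_of_match m' hm'sorted hm' hne'
          have : m'.toList.length ≤ j₀ := Nat.le_findGreatest (by omega) hcond'
          rw [hmlen, PySem.Str.len_eq]
          exact_mod_cast this
      rw [hAval, hBval, hmlen]
    · push Not at hex
      have hnoc : ∀ i ∈ I, ¬ pvCond k known i = true := by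
        intro i hi hci
        have hib := (hImem i).1 hi
        have hieq : i = ((i.toNat : Nat) : Int) := by omega
        rw [hieq] at hci
        exact absurd hci (hex i.toNat (by omega))
      have hnom : ∀ m' ∈ PySem.List.sorted orgs (fun o => PySem.Str.len o) true,
          ¬ pvMatch k m' := by
        intro m' hm'sorted hm'
        rw [PySem.List.mem_sorted] at hm'sorted
        have hne' : k ≠ m' := by
          rintro rfl
          exact hk hm'sorted
        obtain ⟨hcond', hlt'⟩ := hcond_of_match m' hm'sorted hm' hne'
        exact absurd hcond' (hex m'.toList.length hlt')
      rw [hB, pvBLoop_eq_default hnoc]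
      unfold parse_organism_key_py
      rw [pvALoop_eq_default hnom]

-- ===== VERDICT (by name: the statement is the Claim_ definition above) =====
theorem parse_organism_key_py_spec : Claim_equal_parse_organism_key_py := by
  intro k orgs _
  unfold Spec_parse_organism_key_py
  exact pv_main k orgs
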